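-- pv_equiv track=rewrite | github.com/pramishp/process_data | process_data_vicaaya/utils.py | concat_list
-- ===== SOURCE A (Python) =====
-- def concat_list(word_list, index=0, sentence="", sentences=None):
--     if sentences is None:
--         sentences = []
--     sentence += word_list[index] + " "
--     sentences.append(sentence.strip())
--     if len(word_list) == index + 1: return sentences
--     index += 1
--     return concat_list(word_list, index, sentence, sentences)
-- ===== SOURCE B (Python) =====
-- def concat_list(word_list, index=0, sentence="", sentences=None):
--     if sentences is None:
--         sentences = []
--     for i in range(index, len(word_list)):
--         sentence += word_list[i] + " "
--         sentences.append(sentence.strip())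
--     return sentences
-- ===== Notes on version B (the rewrite author's own statement) =====
-- stated objective: simpler
-- what changed: A's tail recursion with an explicit len==index+1 stop test and index arithmetic is replaced by one plain for-loop over range(index, len(word_list)) with straight-line accumulation; Pre_ excludes only index >= len(word_list), where A raises IndexError.
import Mathlib
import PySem

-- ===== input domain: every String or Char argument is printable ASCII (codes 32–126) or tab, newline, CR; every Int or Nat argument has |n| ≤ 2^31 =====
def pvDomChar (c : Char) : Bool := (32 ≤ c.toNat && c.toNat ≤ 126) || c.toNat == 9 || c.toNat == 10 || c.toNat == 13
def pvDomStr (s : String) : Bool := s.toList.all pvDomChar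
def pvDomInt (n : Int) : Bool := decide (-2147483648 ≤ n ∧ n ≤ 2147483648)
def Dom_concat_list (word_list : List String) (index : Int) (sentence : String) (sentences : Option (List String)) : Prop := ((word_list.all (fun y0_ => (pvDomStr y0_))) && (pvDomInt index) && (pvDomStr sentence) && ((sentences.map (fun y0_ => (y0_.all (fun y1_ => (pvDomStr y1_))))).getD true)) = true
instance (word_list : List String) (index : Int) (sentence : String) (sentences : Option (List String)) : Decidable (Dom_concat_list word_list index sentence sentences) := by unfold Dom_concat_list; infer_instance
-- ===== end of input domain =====

-- B replaces A's tail recursion by one plain for-loop over range(index, len(word_list)) (objective: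
-- simpler). Both A and B mutate a caller-supplied `sentences` list; the claim is about the return value.

-- ===== PORT A =====
def concat_list (word_list : List String) (index : Int) (sentence : String) (sentences : Option (List String)) : List String :=
  let ss := sentences.getD []
  match h : PySem.List.pyGet? word_list index with
  | none => []  -- word_list[index] raises IndexError; excluded by Pre_
  | some w =>
    let sentence' := sentence ++ w ++ " "
    let ss' := ss ++ [PySem.Str.strip sentence']
    if (word_list.length : Int) = index + 1 then ss'
    else concat_list word_list (index + 1) sentence' (some ss')
termination_by ((word_list.length : Int) - index).toNat
decreasing_by
  have hr : PySem.Raise.InRange word_list.length index := by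
    by_contra hc
    rw [← PySem.List.pyGet?_eq_none_iff] at hc
    simp [hc] at h
  simp [PySem.Raise.InRange] at hr
  omega

-- ===== PORT B =====
-- the body of B's for-loop; `none` = IndexError inside the loop (excluded by Pre_)
def pvStepB (word_list : List String) (st : Option (String × List String)) (i : Int) :
    Option (String × List String) :=
  match st with
  | none => none
  | some (s, acc) =>
    match PySem.List.pyGet? word_list i with
    | none => none
    | some w => some (s ++ w ++ " ", acc ++ [PySem.Str.strip (s ++ w ++ " ")])

def concat_list_alt (word_list : List String) (index : Int) (sentence : String) (sentences : Option (List String)) : List String :=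
  let ss := sentences.getD []
  match (PySem.List.pyRange index (word_list.length : Int) 1).foldl (pvStepB word_list) (some (sentence, ss)) with
  | none => []
  | some st => st.2

-- ===== PRECONDITION & SPEC =====
-- Pre_ excludes exactly the inputs where Python A raises IndexError: index out of range
-- (with Python's negative-index wrap-around), in particular any index on an empty list.
def Pre_concat_list (word_list : List String) (index : Int) (sentence : String) (sentences : Option (List String)) : Prop :=
  -(word_list.length : Int) ≤ index ∧ index < (word_list.length : Int)
instance (word_list : List String) (index : Int) (sentence : String) (sentences : Option (List String)) : Decidable (Pre_concat_list word_list index sentence sentences) := by unfold Pre_concat_list; infer_instance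

def pvWitness_concat_list : List String × Int × String × Option (List String) := (["hello", "world"], 0, "", none)

def Spec_concat_list (word_list : List String) (index : Int) (sentence : String) (sentences : Option (List String)) (out : List String) : Prop := out = concat_list_alt word_list index sentence sentences
instance (word_list : List String) (index : Int) (sentence : String) (sentences : Option (List String)) (out : List String) : Decidable (Spec_concat_list word_list index sentence sentences out) := by unfold Spec_concat_list; infer_instance

-- ===== CLAIM (what is proved, stated in full; the proofs are below) =====
def Claim_equal_concat_list : Prop := ∀ (word_list : List String) (index : Int) (sentence : String) (sentences : Option (List String)), Dom_concat_list word_list index sentence sentences → Pre_concat_list word_list index sentence sentences → Spec_concat_list word_list index sentence sentences (concat_list word_list index sentence sentences)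

-- ===== LEMMAS AND PROOFS =====

lemma concat_eq_fold (wl : List String) : ∀ (k : Nat) (i : Int) (s : String) (ss : List String),
    ((wl.length : Int) - i).toNat = k → -(wl.length : Int) ≤ i → i < (wl.length : Int) →
    concat_list wl i s (some ss) =
      match (PySem.List.pyRange i (wl.length : Int) 1).foldl (pvStepB wl) (some (s, ss)) with
      | none => []
      | some st => st.2 := by
  intro k
  induction k using Nat.strong_induction_on with
  | _ k ih =>
    intro i s ss hk h1 h2
    have hin : PySem.List.pyGet? wl i ≠ none := by
      intro hc
      rw [PySem.List.pyGet?_eq_none_iff] at hc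
      simp [PySem.Raise.InRange] at hc
      omega
    obtain ⟨w, hw⟩ := Option.ne_none_iff_exists'.mp hin
    rw [concat_list]
    rw [PySem.List.pyRange_one_cons h2, List.foldl_cons]
    split
    · next hnone => exact absurd hnone hin
    · next w' hw' =>
      rw [hw] at hw'
      obtain rfl : w = w' := (Option.some.injEq _ _).mp hw'
      simp only [Option.getD_some, pvStepB, hw]
      by_cases heq : (wl.length : Int) = i + 1
      · rw [if_pos heq, ← heq, PySem.List.pyRange_one_eq_nil (le_refl _), List.foldl_nil]
      · rw [if_neg heq]
        exact ih (((wl.length : Int) - (i + 1)).toNat) (by omega) (i + 1) _ _ rfl (by omega) (by omega)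

lemma concat_none (wl : List String) (i : Int) (s : String) :
    concat_list wl i s none = concat_list wl i s (some []) := by
  rw [concat_list, concat_list]
  rfl

-- ===== VERDICT (by name: the statement is the Claim_ definition above) =====
theorem concat_list_spec : Claim_equal_concat_list := by
  intro wl i s sos _ hpre
  unfold Spec_concat_list concat_list_alt
  cases sos with
  | none =>
      rw [concat_none]
      exact concat_eq_fold wl (((wl.length : Int) - i).toNat) i s [] rfl hpre.1 hpre.2
  | some ss =>
      exact concat_eq_fold wl (((wl.length : Int) - i).toNat) i s ss rfl hpre.1 hpre.2
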